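-- pv_equiv track=rewrite | github.com/hardwell0101/algebraic-earnability-benchmarks | groups/Grigorchuk/Identity_Test.py | reduce_word
-- ===== SOURCE A (Python) =====
-- KLEIN_REDUCTIONS = {
--     'bc': 'd', 'cb': 'd',
--     'cd': 'b', 'dc': 'b',
--     'bd': 'c', 'db': 'c',
-- }
--
-- def reduce_word(word: str) -> str:
--     """Apply self-inverse and Klein four reductions."""
--     if not word:
--         return ""
--
--     prev = None
--     while prev != word:
--         prev = word
--         # Cancel duplicates
--         i = 0
--         result = []
--         while i < len(word):
--             if i + 1 < len(word) and word[i] == word[i + 1]: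
--                 i += 2
--             else:
--                 result.append(word[i])
--                 i += 1
--         word = ''.join(result)
--         # Klein four reductions
--         for pair, replacement in KLEIN_REDUCTIONS.items():
--             word = word.replace(pair, replacement)
--     return word
-- ===== SOURCE B (Python) =====
-- KLEIN_REDUCTIONS = {
--     'bc': 'd', 'cb': 'd',
--     'cd': 'b', 'dc': 'b',
--     'bd': 'c', 'db': 'c',
-- }
--
-- def reduce_word(word: str) -> str:
--     """Apply self-inverse and Klein four reductions (single stack pass)."""
--     stack = []
--     for ch in word:
--         while True:
--             if stack and stack[-1] == ch:
--                 stack.pop()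
--                 break
--             merged = KLEIN_REDUCTIONS.get(stack[-1] + ch) if stack else None
--             if merged is not None:
--                 stack.pop()
--                 ch = merged  # re-process the merged letter against the new top
--             else:
--                 stack.append(ch)
--                 break
--     return ''.join(stack)
-- ===== Notes on version B (the rewrite author's own statement) =====
-- stated objective: faster
-- what changed: Replaced A's fixpoint loop (repeated full duplicate-cancellation passes followed by six whole-string str.replace scans, iterated until the word stops changing) by a single left-to-right pass that maintains a reduced stack, cancelling against the top and re-processing Klein-merged letters against the new top.
import Mathlib
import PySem

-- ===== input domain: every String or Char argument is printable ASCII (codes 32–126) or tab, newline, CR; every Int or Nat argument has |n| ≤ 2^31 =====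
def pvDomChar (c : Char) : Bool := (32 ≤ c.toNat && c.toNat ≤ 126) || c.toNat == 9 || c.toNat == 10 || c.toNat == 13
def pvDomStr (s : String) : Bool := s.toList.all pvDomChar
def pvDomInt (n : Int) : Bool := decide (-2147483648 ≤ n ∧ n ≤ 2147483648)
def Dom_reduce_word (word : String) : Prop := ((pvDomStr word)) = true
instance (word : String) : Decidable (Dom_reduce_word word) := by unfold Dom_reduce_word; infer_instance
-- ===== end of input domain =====

-- B replaces A's until-fixpoint rescanning (duplicate-cancel pass + six whole-string replaces,
-- repeated until the word stops changing) by one left-to-right pass over a reduced stack.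

-- ===== PORT A =====

-- inner while-loop of A: one left-to-right pass cancelling adjacent equal characters
def dpA : List Char → List Char
  | [] => []
  | [a] => [a]
  | a :: b :: t => if a = b then dpA t else a :: dpA (b :: t)

-- one iteration of A's outer while-loop body: duplicate cancellation, then the six
-- `word.replace(pair, replacement)` calls in KLEIN_REDUCTIONS' insertion order
def stepA (l : List Char) : List Char :=
  PySem.Chars.replace (PySem.Chars.replace (PySem.Chars.replace (PySem.Chars.replace
    (PySem.Chars.replace (PySem.Chars.replace (dpA l)
      ['b','c'] ['d']) ['c','b'] ['d']) ['c','d'] ['b']) ['d','c'] ['b']) ['b','d'] ['c']) ['d','b'] ['c']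

-- A's `while prev != word` loop; the fuel only makes it total (length+1 always suffices:
-- every changing iteration strictly shortens the word — proved in loopA_good below)
def loopA : Nat → List Char → List Char
  | 0, l => l
  | f + 1, l => if stepA l = l then l else loopA f (stepA l)

def reduce_word (word : String) : String :=
  if word.toList = [] then ""  -- `if not word: return ""`
  else String.ofList (loopA (word.toList.length + 1) word.toList)

-- ===== PORT B =====

-- KLEIN_REDUCTIONS.get(stack[-1] + ch): the literal six-entry table as a function
def kleinGet (a b : Char) : Option Char :=
  if a = 'b' ∧ b = 'c' then some 'd'
  else if a = 'c' ∧ b = 'b' then some 'd'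
  else if a = 'c' ∧ b = 'd' then some 'b'
  else if a = 'd' ∧ b = 'c' then some 'b'
  else if a = 'b' ∧ b = 'd' then some 'c'
  else if a = 'd' ∧ b = 'b' then some 'c'
  else none

-- Source B's inner `while True` loop: push ch onto the stack, cancelling against the top
-- and re-processing a Klein-merged letter against the new top (stack head = top)
def pushB : List Char → Char → List Char
  | [], c => [c]
  | t :: s, c =>
    if t = c then s
    else match kleinGet t c with
      | some m => pushB s m
      | none => c :: t :: s

def reduce_word_alt (word : String) : String :=
  String.ofList ((word.toList.foldl pushB []).reverse)

-- ===== PRECONDITION & SPEC =====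
def Spec_reduce_word (word : String) (out : String) : Prop := out = reduce_word_alt word
instance (word : String) (out : String) : Decidable (Spec_reduce_word word out) := by unfold Spec_reduce_word; infer_instance

-- ===== CLAIM (what is proved, stated in full; the proofs are below) =====
def Claim_equal_reduce_word : Prop := ∀ (word : String), Dom_reduce_word word → Spec_reduce_word word (reduce_word word)

-- ===== LEMMAS AND PROOFS =====

-- ---- facts about the Klein table ----

lemma klein_cases {a b m : Char} (h : kleinGet a b = some m) :
    (a = 'b' ∧ b = 'c' ∧ m = 'd') ∨ (a = 'c' ∧ b = 'b' ∧ m = 'd') ∨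
    (a = 'c' ∧ b = 'd' ∧ m = 'b') ∨ (a = 'd' ∧ b = 'c' ∧ m = 'b') ∨
    (a = 'b' ∧ b = 'd' ∧ m = 'c') ∨ (a = 'd' ∧ b = 'b' ∧ m = 'c') := by
  unfold kleinGet at h
  split_ifs at h with h1 h2 h3 h4 h5 h6
  · exact Or.inl ⟨h1.1, h1.2, (Option.some.inj h).symm⟩
  · exact Or.inr (Or.inl ⟨h2.1, h2.2, (Option.some.inj h).symm⟩)
  · exact Or.inr (Or.inr (Or.inl ⟨h3.1, h3.2, (Option.some.inj h).symm⟩))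
  · exact Or.inr (Or.inr (Or.inr (Or.inl ⟨h4.1, h4.2, (Option.some.inj h).symm⟩)))
  · exact Or.inr (Or.inr (Or.inr (Or.inr (Or.inl ⟨h5.1, h5.2, (Option.some.inj h).symm⟩))))
  · exact Or.inr (Or.inr (Or.inr (Or.inr (Or.inr ⟨h6.1, h6.2, (Option.some.inj h).symm⟩))))

lemma klein_some_facts {x y m : Char} (h : kleinGet x y = some m) :
    x ≠ y ∧ m ≠ x ∧ m ≠ y ∧ kleinGet x m = some y ∧ kleinGet m y = some x := by
  rcases klein_cases h with ⟨rfl,rfl,rfl⟩|⟨rfl,rfl,rfl⟩|⟨rfl,rfl,rfl⟩|⟨rfl,rfl,rfl⟩|⟨rfl,rfl,rfl⟩|⟨rfl,rfl,rfl⟩ <;>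
    exact (by decide)

lemma notK_of_none {u t : Char} (ht : t = 'b' ∨ t = 'c' ∨ t = 'd') (hne : u ≠ t)
    (h : kleinGet u t = none) : u ≠ 'b' ∧ u ≠ 'c' ∧ u ≠ 'd' := by
  rcases ht with rfl | rfl | rfl <;>
    refine ⟨fun hu => ?_, fun hu => ?_, fun hu => ?_⟩ <;> subst hu <;>
    first
      | exact hne rfl
      | exact absurd h (by decide)

lemma klein_none_of_notK {u : Char} (h : u ≠ 'b' ∧ u ≠ 'c' ∧ u ≠ 'd') (b : Char) :
    kleinGet u b = none := by
  unfold kleinGet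
  split_ifs <;> simp_all

lemma klein_none_combine {a b : Char}
    (h1 : ¬(a = 'b' ∧ b = 'c')) (h2 : ¬(a = 'c' ∧ b = 'b')) (h3 : ¬(a = 'c' ∧ b = 'd'))
    (h4 : ¬(a = 'd' ∧ b = 'c')) (h5 : ¬(a = 'b' ∧ b = 'd')) (h6 : ¬(a = 'd' ∧ b = 'b')) :
    kleinGet a b = none := by
  unfold kleinGet
  split_ifs <;> simp_all

-- ---- the stack invariant: a reduced stack (head = most recent letter) ----

abbrev StRel (a b : Char) : Prop := b ≠ a ∧ kleinGet b a = none

-- ---- the three key facts about pushB on reduced stacks ----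

lemma push_red : ∀ (s : List Char) (c : Char), List.IsChain StRel s → List.IsChain StRel (pushB s c) := by
  intro s
  induction s with
  | nil => intro c _; exact List.isChain_singleton c
  | cons t s' ih =>
    intro c h
    by_cases htc : t = c
    · simpa [pushB, htc] using h.tail
    · cases hk : kleinGet t c with
      | some m => simpa [pushB, htc, hk] using ih m h.tail
      | none =>
        simp only [pushB, if_neg htc, hk]
        exact List.isChain_cons_cons.mpr ⟨⟨htc, hk⟩, h⟩

lemma push_push_self {s : List Char} {c : Char} (h : List.IsChain StRel s) :
    pushB (pushB s c) c = s := by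
  cases s with
  | nil => simp [pushB]
  | cons t s' =>
    by_cases htc : t = c
    · subst htc
      simp only [pushB, if_pos rfl]
      cases s' with
      | nil => simp [pushB]
      | cons u s'' =>
        obtain ⟨⟨hR1, hR2⟩, -⟩ := List.isChain_cons_cons.mp h
        simp [pushB, hR1, hR2]
    · cases hk : kleinGet t c with
      | none => simp [pushB, htc, hk]
      | some m =>
        rcases klein_cases hk with ⟨rfl,rfl,rfl⟩|⟨rfl,rfl,rfl⟩|⟨rfl,rfl,rfl⟩|⟨rfl,rfl,rfl⟩|⟨rfl,rfl,rfl⟩|⟨rfl,rfl,rfl⟩ <;>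
        cases s' with
        | nil => decide
        | cons u s'' =>
          obtain ⟨⟨hR1, hR2⟩, -⟩ := List.isChain_cons_cons.mp h
          have hUK := notK_of_none (by decide) hR1 hR2
          have hunone := klein_none_of_notK hUK
          simp [pushB, kleinGet, hR1, hUK.1, hUK.2.1, hUK.2.2, hunone]

lemma push_push_klein : ∀ (s : List Char) (x y m : Char), kleinGet x y = some m →
    List.IsChain StRel s → pushB (pushB s x) y = pushB s m := by
  intro s
  induction s with
  | nil =>
    intro x y m hxy _
    have f := klein_some_facts hxy
    simp [pushB, f.1, hxy]
  | cons t s' ih =>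
    intro x y m hxy h
    have f := klein_some_facts hxy
    by_cases htx : t = x
    · subst htx
      have hxm : ¬ (t = m) := fun e => f.2.1 e.symm
      simp [pushB, hxm, f.2.2.2.1]
    · cases hk2 : kleinGet t x with
      | none => simp [pushB, htx, hk2, f.1, hxy]
      | some m2 =>
        rcases klein_cases hxy with ⟨rfl,rfl,rfl⟩|⟨rfl,rfl,rfl⟩|⟨rfl,rfl,rfl⟩|⟨rfl,rfl,rfl⟩|⟨rfl,rfl,rfl⟩|⟨rfl,rfl,rfl⟩ <;>
        rcases klein_cases hk2 with ⟨rfl,h2,rfl⟩|⟨rfl,h2,rfl⟩|⟨rfl,h2,rfl⟩|⟨rfl,h2,rfl⟩|⟨rfl,h2,rfl⟩|⟨rfl,h2,rfl⟩ <;>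
        first
          | exact absurd h2 (by decide)
          | (simp only [pushB, kleinGet, reduceIte]
             first
               | exact push_push_self h.tail
               | exact ih _ _ _ rfl h.tail)

-- ---- pushB-invariance of A's two transformations ----

lemma dp_foldl : ∀ (l s : List Char), List.IsChain StRel s →
    List.foldl pushB s (dpA l) = List.foldl pushB s l := by
  intro l
  induction l using dpA.induct with
  | case1 => intro s _; rfl
  | case2 a => intro s _; rfl
  | case3 b t ih =>
    intro s hs
    have hd : dpA (b :: b :: t) = dpA t := by simp [dpA]
    rw [hd, ih s hs]
    simp only [List.foldl_cons]
    rw [push_push_self hs]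
  | case4 a b t hab ih =>
    intro s hs
    have hd : dpA (a :: b :: t) = a :: dpA (b :: t) := by simp [dpA, hab]
    rw [hd]
    simp only [List.foldl_cons]
    exact ih (pushB s a) (push_red s a hs)

-- the single-pass replacement a 2-character `str.replace` performs, as structural recursion
def repL (x y m : Char) : List Char → List Char
  | [] => []
  | [a] => [a]
  | a :: b :: t => if a = x ∧ b = y then m :: repL x y m t else a :: repL x y m (b :: t)

lemma rep_foldl {x y m : Char} (hxy : kleinGet x y = some m) :
    ∀ (l s : List Char), List.IsChain StRel s →
      List.foldl pushB s (repL x y m l) = List.foldl pushB s l := by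
  intro l
  induction l using repL.induct x y with
  | case1 => intro s _; rfl
  | case2 a => intro s _; rfl
  | case3 a b t hab ih =>
    obtain ⟨rfl, rfl⟩ := hab
    intro s hs
    simp only [repL, List.foldl_cons, and_self, if_true, reduceIte]
    rw [ih (pushB s m) (push_red s m hs), push_push_klein s a b m hxy hs]
  | case4 a b t hab ih =>
    intro s hs
    simp only [repL, if_neg hab, List.foldl_cons]
    exact ih (pushB s a) (push_red s a hs)

-- ---- PySem.Chars.replace on a 2-character pattern is exactly repL ----

lemma go_eq (x y m : Char) : ∀ (fuel : Nat) (l acc : List Char), l.length ≤ fuel →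
    PySem.Chars.replace.go [x, y] [m] fuel l acc = acc.reverse ++ repL x y m l := by
  intro fuel
  induction fuel with
  | zero =>
    intro l acc h
    cases l with
    | nil => simp [PySem.Chars.replace.go, repL]
    | cons a t => simp at h
  | succ f ih =>
    intro l acc h
    match l with
    | [] => simp [PySem.Chars.replace.go, repL]
    | [a] =>
      have hpre : List.isPrefixOf [x, y] [a] = false := by
        show ((x == a) && false) = false
        simp
      simp only [PySem.Chars.replace.go, hpre, Bool.false_eq_true, if_false]
      rw [ih [] (a :: acc) (by simp)]
      simp [repL]
    | a :: b :: t =>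
      by_cases hab : a = x ∧ b = y
      · obtain ⟨rfl, rfl⟩ := hab
        have hpre : List.isPrefixOf [a, b] (a :: b :: t) = true := by
          show ((a == a) && ((b == b) && true)) = true
          simp
        simp only [PySem.Chars.replace.go, hpre, if_true]
        have hdrop : List.drop (List.length [a, b]) (a :: b :: t) = t := by simp
        rw [hdrop]
        rw [ih t (List.reverse [m] ++ acc) (by simp at h ⊢; omega)]
        simp [repL]
      · have hpre : List.isPrefixOf [x, y] (a :: b :: t) = false := by
          show ((x == a) && ((y == b) && true)) = false
          cases hxa : x == a with
          | false => simp
          | true =>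
            cases hyb : y == b with
            | false => simp
            | true => exact absurd ⟨(eq_of_beq hxa).symm, (eq_of_beq hyb).symm⟩ hab
        simp only [PySem.Chars.replace.go, hpre, Bool.false_eq_true, if_false]
        rw [ih (b :: t) (a :: acc) (by simp at h ⊢; omega)]
        simp [repL, if_neg hab]

lemma replace_eq_repL (x y m : Char) (l : List Char) :
    PySem.Chars.replace l [x, y] [m] = repL x y m l := by
  unfold PySem.Chars.replace
  simp only [List.isEmpty_cons, Bool.false_eq_true, if_false]
  rw [go_eq x y m l.length l [] le_rfl]
  simp

-- ---- stepA as six repLs, and what a fixpoint of stepA looks like ----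

lemma stepA_eq_repL (l : List Char) :
    stepA l = repL 'd' 'b' 'c' (repL 'b' 'd' 'c' (repL 'd' 'c' 'b' (repL 'c' 'd' 'b'
      (repL 'c' 'b' 'd' (repL 'b' 'c' 'd' (dpA l)))))) := by
  simp [stepA, replace_eq_repL]

lemma repL_length_le (x y m : Char) : ∀ (l : List Char), (repL x y m l).length ≤ l.length := by
  intro l
  induction l using repL.induct x y with
  | case1 => simp [repL]
  | case2 a => simp [repL]
  | case3 a b t hab ih => simp [repL, if_pos hab]; omega
  | case4 a b t hab ih =>
    simp only [List.length_cons] at ih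
    simp [repL, if_neg hab]
    omega

lemma repL_eq_of_length {x y m : Char} : ∀ {l : List Char},
    (repL x y m l).length = l.length → repL x y m l = l := by
  intro l
  induction l using repL.induct x y with
  | case1 => intro _; rfl
  | case2 a => intro _; rfl
  | case3 a b t hab ih =>
    intro h
    exfalso
    have := repL_length_le x y m t
    simp [repL, if_pos hab] at h
    omega
  | case4 a b t hab ih =>
    intro h
    have h' : (repL x y m (b :: t)).length = (b :: t).length := by
      simp [repL, if_neg hab] at h
      simp only [List.length_cons]
      omega
    simp [repL, if_neg hab]
    exact ih h'

lemma dpA_length_le : ∀ (l : List Char), (dpA l).length ≤ l.length := by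
  intro l
  induction l using dpA.induct with
  | case1 => simp [dpA]
  | case2 a => simp [dpA]
  | case3 b t ih => simp [dpA]; omega
  | case4 a b t hab ih =>
    simp only [List.length_cons] at ih
    simp [dpA, hab]
    omega

lemma dpA_eq_of_length : ∀ {l : List Char}, (dpA l).length = l.length → dpA l = l := by
  intro l
  induction l using dpA.induct with
  | case1 => intro _; rfl
  | case2 a => intro _; rfl
  | case3 b t ih =>
    intro h
    exfalso
    have := dpA_length_le t
    simp [dpA] at h
    omega
  | case4 a b t hab ih =>
    intro h
    have h' : (dpA (b :: t)).length = (b :: t).length := by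
      simp [dpA, hab] at h
      simp only [List.length_cons]
      omega
    simp [dpA, hab]
    exact ih h'

lemma stepA_parts {l : List Char} (h : (stepA l).length = l.length) :
    dpA l = l ∧ repL 'b' 'c' 'd' l = l ∧ repL 'c' 'b' 'd' l = l ∧ repL 'c' 'd' 'b' l = l ∧
    repL 'd' 'c' 'b' l = l ∧ repL 'b' 'd' 'c' l = l ∧ repL 'd' 'b' 'c' l = l ∧ stepA l = l := by
  have hs := stepA_eq_repL l
  have L0 := dpA_length_le l
  set a0 := dpA l with h0
  have L1 := repL_length_le 'b' 'c' 'd' a0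
  set a1 := repL 'b' 'c' 'd' a0 with h1
  have L2 := repL_length_le 'c' 'b' 'd' a1
  set a2 := repL 'c' 'b' 'd' a1 with h2
  have L3 := repL_length_le 'c' 'd' 'b' a2
  set a3 := repL 'c' 'd' 'b' a2 with h3
  have L4 := repL_length_le 'd' 'c' 'b' a3
  set a4 := repL 'd' 'c' 'b' a3 with h4
  have L5 := repL_length_le 'b' 'd' 'c' a4
  set a5 := repL 'b' 'd' 'c' a4 with h5
  have L6 := repL_length_le 'd' 'b' 'c' a5
  set a6 := repL 'd' 'b' 'c' a5 with h6
  rw [hs] at h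
  have e0 : a0 = l := by rw [h0]; exact dpA_eq_of_length (by rw [← h0]; omega)
  have e1 : a1 = a0 := by rw [h1]; exact repL_eq_of_length (by rw [← h1]; omega)
  have e2 : a2 = a1 := by rw [h2]; exact repL_eq_of_length (by rw [← h2]; omega)
  have e3 : a3 = a2 := by rw [h3]; exact repL_eq_of_length (by rw [← h3]; omega)
  have e4 : a4 = a3 := by rw [h4]; exact repL_eq_of_length (by rw [← h4]; omega)
  have e5 : a5 = a4 := by rw [h5]; exact repL_eq_of_length (by rw [← h5]; omega)
  have e6 : a6 = a5 := by rw [h6]; exact repL_eq_of_length (by rw [← h6]; omega)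
  have q0 : a0 = l := e0
  have q1 : a1 = l := e1.trans q0
  have q2 : a2 = l := e2.trans q1
  have q3 : a3 = l := e3.trans q2
  have q4 : a4 = l := e4.trans q3
  have q5 : a5 = l := e5.trans q4
  have q6 : a6 = l := e6.trans q5
  refine ⟨q0, ?_, ?_, ?_, ?_, ?_, ?_, hs.trans q6⟩
  · rw [← q0] at q1 ⊢; exact h1 ▸ q1
  · rw [← q1] at q2 ⊢; exact h2 ▸ q2
  · rw [← q2] at q3 ⊢; exact h3 ▸ q3
  · rw [← q3] at q4 ⊢; exact h4 ▸ q4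
  · rw [← q4] at q5 ⊢; exact h5 ▸ q5
  · rw [← q5] at q6 ⊢; exact h6 ▸ q6

lemma stepA_length_le (l : List Char) : (stepA l).length ≤ l.length := by
  rw [stepA_eq_repL]
  exact le_trans (repL_length_le _ _ _ _) (le_trans (repL_length_le _ _ _ _)
    (le_trans (repL_length_le _ _ _ _) (le_trans (repL_length_le _ _ _ _)
      (le_trans (repL_length_le _ _ _ _) (le_trans (repL_length_le _ _ _ _) (dpA_length_le l))))))

lemma stepA_len_lt {l : List Char} (h : stepA l ≠ l) : (stepA l).length < l.length := by
  by_contra hlt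
  push_neg at hlt
  have hle := stepA_length_le l
  exact h (stepA_parts (by omega)).2.2.2.2.2.2.2

-- ---- a fixpoint of stepA is a reduced word ----

lemma no_dup : ∀ {l : List Char}, dpA l = l → List.IsChain (· ≠ ·) l := by
  intro l
  induction l using dpA.induct with
  | case1 => intro _; exact List.IsChain.nil
  | case2 a => intro _; exact List.isChain_singleton a
  | case3 b t ih =>
    intro h
    exfalso
    have h' := congrArg List.length h
    have := dpA_length_le t
    simp [dpA] at h'
    omega
  | case4 a b t hab ih =>
    intro h
    simp only [dpA, if_neg hab, List.cons.injEq, true_and] at h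
    exact List.isChain_cons_cons.mpr ⟨hab, ih h⟩

lemma no_pat {x y m : Char} : ∀ {l : List Char}, repL x y m l = l →
    List.IsChain (fun a b => ¬(a = x ∧ b = y)) l := by
  intro l
  induction l using repL.induct x y with
  | case1 => intro _; exact List.IsChain.nil
  | case2 a => intro _; exact List.isChain_singleton a
  | case3 a b t hab ih =>
    intro h
    exfalso
    have h' := congrArg List.length h
    have := repL_length_le x y m t
    simp [repL, if_pos hab] at h'
    omega
  | case4 a b t hab ih =>
    intro h
    simp only [repL, if_neg hab, List.cons.injEq, true_and] at h
    exact List.isChain_cons_cons.mpr ⟨hab, ih h⟩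

lemma fix_chain {L : List Char} (h : stepA L = L) :
    List.IsChain (fun a b => a ≠ b ∧ kleinGet a b = none) L := by
  obtain ⟨e0, e1, e2, e3, e4, e5, e6, -⟩ := stepA_parts (l := L) (by rw [h])
  have c0 := List.isChain_iff_getElem.mp (no_dup e0)
  have c1 := List.isChain_iff_getElem.mp (no_pat e1)
  have c2 := List.isChain_iff_getElem.mp (no_pat e2)
  have c3 := List.isChain_iff_getElem.mp (no_pat e3)
  have c4 := List.isChain_iff_getElem.mp (no_pat e4)
  have c5 := List.isChain_iff_getElem.mp (no_pat e5)
  have c6 := List.isChain_iff_getElem.mp (no_pat e6)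
  rw [List.isChain_iff_getElem]
  intro i hi
  exact ⟨c0 i hi, klein_none_combine (c1 i hi) (c2 i hi) (c3 i hi) (c4 i hi) (c5 i hi) (c6 i hi)⟩

-- ---- on a reduced word the stack pass is the identity (up to reversal) ----

lemma nf_push_aux : ∀ (l : List Char) (t : Char) (s : List Char),
    List.IsChain (fun a b => a ≠ b ∧ kleinGet a b = none) (t :: l) →
    List.foldl pushB (t :: s) l = l.reverse ++ t :: s := by
  intro l
  induction l with
  | nil => intro t s _; rfl
  | cons c l' ih =>
    intro t s h
    obtain ⟨⟨hne, hnone⟩, h'⟩ := List.isChain_cons_cons.mp h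
    have hp : pushB (t :: s) c = c :: t :: s := by
      simp [pushB, hne, hnone]
    simp only [List.foldl_cons, hp]
    rw [ih c (t :: s) h']
    simp

lemma nf_foldl {l : List Char}
    (h : List.IsChain (fun a b => a ≠ b ∧ kleinGet a b = none) l) :
    List.foldl pushB [] l = l.reverse := by
  cases l with
  | nil => rfl
  | cons t l' =>
    have hp : pushB [] t = [t] := rfl
    simp only [List.foldl_cons, hp]
    rw [nf_push_aux l' t [] h]
    simp

-- ---- the outer loop: enough fuel reaches a fixpoint and preserves the stack pass ----

lemma step_foldl (l : List Char) :
    List.foldl pushB [] (stepA l) = List.foldl pushB [] l := by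
  rw [stepA_eq_repL]
  rw [rep_foldl (by decide) _ _ List.IsChain.nil]
  rw [rep_foldl (by decide) _ _ List.IsChain.nil]
  rw [rep_foldl (by decide) _ _ List.IsChain.nil]
  rw [rep_foldl (by decide) _ _ List.IsChain.nil]
  rw [rep_foldl (by decide) _ _ List.IsChain.nil]
  rw [rep_foldl (by decide) _ _ List.IsChain.nil]
  exact dp_foldl l [] List.IsChain.nil

lemma loopA_good : ∀ (f : Nat) (l : List Char), l.length < f →
    stepA (loopA f l) = loopA f l ∧
      List.foldl pushB [] (loopA f l) = List.foldl pushB [] l := by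
  intro f
  induction f with
  | zero => intro l h; omega
  | succ f ih =>
    intro l h
    by_cases hfix : stepA l = l
    · refine ⟨?_, ?_⟩ <;> simp [loopA, hfix]
    · have hlt := stepA_len_lt hfix
      have hrec := ih (stepA l) (by omega)
      simp only [loopA, if_neg hfix]
      exact ⟨hrec.1, hrec.2.trans (step_foldl l)⟩

-- ===== VERDICT (by name: the statement is the Claim_ definition above) =====
theorem reduce_word_spec : Claim_equal_reduce_word := by
  intro w _
  unfold Spec_reduce_word reduce_word reduce_word_alt
  by_cases hw : w.toList = []
  · rw [if_pos hw, hw]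
    rfl
  · rw [if_neg hw]
    obtain ⟨hfix, hinv⟩ := loopA_good (w.toList.length + 1) w.toList (by omega)
    have hnf := nf_foldl (fix_chain hfix)
    rw [hnf] at hinv
    rw [← hinv, List.reverse_reverse]
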